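-- pv_equiv track=rewrite | github.com/PavelZurek/advent-of-code | 2021/13/main.py | getMaxCoords
-- ===== SOURCE A (Python) =====
-- def getMaxCoords(coordinates):
--     maxCoords = list(coordinates[0])
--
--     for coords in coordinates:
--         if coords[0] > maxCoords[0]:
--             maxCoords[0] = coords[0]
--         if coords[1] > maxCoords[1]:
--             maxCoords[1] = coords[1]
--
--     return maxCoords
-- ===== SOURCE B (Python) =====
-- def getMaxCoords(coordinates):
--     xs = sorted(c[0] for c in coordinates)
--     ys = sorted(c[1] for c in coordinates)
--     return [xs[-1], ys[-1]]
-- ===== Notes on version B (the rewrite author's own statement) =====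
-- stated objective: alternative
-- what changed: Replaces A's single simultaneous-tracking loop seeded from the first coordinate with a sort of each coordinate axis, reading the maximum off the end of each sorted list.
import Mathlib
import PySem

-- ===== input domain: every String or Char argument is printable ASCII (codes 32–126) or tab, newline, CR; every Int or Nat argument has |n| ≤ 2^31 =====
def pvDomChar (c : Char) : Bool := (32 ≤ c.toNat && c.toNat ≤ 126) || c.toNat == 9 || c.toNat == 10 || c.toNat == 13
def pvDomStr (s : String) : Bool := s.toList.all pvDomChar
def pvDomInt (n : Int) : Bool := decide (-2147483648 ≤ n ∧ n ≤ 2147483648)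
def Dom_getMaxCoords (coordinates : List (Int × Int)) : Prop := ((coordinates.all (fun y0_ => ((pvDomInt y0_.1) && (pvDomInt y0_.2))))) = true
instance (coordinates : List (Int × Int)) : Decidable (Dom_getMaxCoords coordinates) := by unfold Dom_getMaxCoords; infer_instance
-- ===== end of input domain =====

-- B replaces A's single simultaneous-tracking loop (seeded from coordinates[0]) with a
-- sort of each coordinate axis, reading the maximum off the end of each sorted list
-- (objective: alternative). Pre_ excludes the empty list, on which A raises IndexError.

-- ===== PORT A =====
def getMaxCoords (coordinates : List (Int × Int)) : List Int :=
  match coordinates with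
  | [] => []  -- unreachable under Pre_: coordinates[0] raises IndexError in Python
  | c :: _ =>
    let r := coordinates.foldl (fun m coords =>
      (if coords.1 > m.1 then coords.1 else m.1,
       if coords.2 > m.2 then coords.2 else m.2)) (c.1, c.2)
    [r.1, r.2]

-- ===== PORT B =====
def getMaxCoords_alt (coordinates : List (Int × Int)) : List Int :=
  let xs := PySem.List.sorted (coordinates.map Prod.fst) (fun x => x) false
  let ys := PySem.List.sorted (coordinates.map Prod.snd) (fun x => x) false
  match PySem.List.pyGet? xs (-1), PySem.List.pyGet? ys (-1) with
  | some x, some y => [x, y]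
  | _, _ => []  -- unreachable under Pre_: xs[-1] raises IndexError on an empty list

-- ===== PRECONDITION & SPEC =====
-- Pre_ excludes the empty list, on which A raises IndexError (B raises IndexError too).
def Pre_getMaxCoords (coordinates : List (Int × Int)) : Prop := coordinates ≠ []
instance (coordinates : List (Int × Int)) : Decidable (Pre_getMaxCoords coordinates) := by unfold Pre_getMaxCoords; infer_instance
def pvWitness_getMaxCoords : (List (Int × Int)) := [(1, 2), (3, 0)]
def Spec_getMaxCoords (coordinates : List (Int × Int)) (out : List Int) : Prop := out = getMaxCoords_alt coordinates
instance (coordinates : List (Int × Int)) (out : List Int) : Decidable (Spec_getMaxCoords coordinates out) := by unfold Spec_getMaxCoords; infer_instance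

-- ===== CLAIM =====
def Claim_equal_getMaxCoords : Prop := ∀ (coordinates : List (Int × Int)), Dom_getMaxCoords coordinates → Pre_getMaxCoords coordinates → Spec_getMaxCoords coordinates (getMaxCoords coordinates)

-- ===== LEMMAS AND PROOFS =====
lemma pairFold_eq (t : List (Int × Int)) (a b : Int) :
    t.foldl (fun m coords =>
      (if coords.1 > m.1 then coords.1 else m.1,
       if coords.2 > m.2 then coords.2 else m.2)) (a, b)
    = ((t.map Prod.fst).foldl max a, (t.map Prod.snd).foldl max b) := by
  induction t generalizing a b with
  | nil => simp
  | cons h t ih =>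
      simp only [List.foldl_cons, List.map_cons, ih]
      congr 1 <;> congr 1 <;> simp [max_def] <;> split_ifs <;> omega

lemma foldl_max_mem (a : Int) (l : List Int) : l.foldl max a ∈ a :: l := by
  induction l generalizing a with
  | nil => simp
  | cons h t ih =>
      simp only [List.foldl_cons, List.mem_cons]
      rcases max_choice a h with hm | hm <;> rw [hm]
      · have := ih a; simp only [List.mem_cons] at this; tauto
      · have := ih h; simp only [List.mem_cons] at this; tauto

lemma le_foldl_max (a : Int) (l : List Int) : ∀ x ∈ a :: l, x ≤ l.foldl max a := by
  induction l generalizing a with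
  | nil => simp
  | cons h t ih =>
      intro x hx
      simp only [List.mem_cons] at hx
      simp only [List.foldl_cons]
      rcases hx with rfl | rfl | hx
      · exact le_trans (le_max_left x h) (ih _ _ (by simp))
      · exact le_trans (le_max_right a x) (ih _ _ (by simp))
      · exact ih _ _ (by simp [hx])

lemma pairwise_getLast?_ge (s : List Int) (hp : s.Pairwise (· ≤ ·)) :
    ∀ x ∈ s, ∃ m, s.getLast? = some m ∧ x ≤ m := by
  induction s with
  | nil => simp
  | cons h t ih =>
      intro x hx
      match t, hp, hx with
      | [], _, hx =>
          simp only [List.mem_singleton] at hx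
          exact ⟨h, by simp [hx]⟩
      | b :: t', hp, hx =>
          have hht : ∀ y ∈ b :: t', h ≤ y := fun y hy => (List.pairwise_cons.mp hp).1 y hy
          have hpt : (b :: t').Pairwise (· ≤ ·) := (List.pairwise_cons.mp hp).2
          simp only [List.mem_cons] at hx
          rcases hx with rfl | hx
          · obtain ⟨m, hm, hbm⟩ := ih hpt b (by simp)
            exact ⟨m, by simpa using hm, le_trans (hht b (by simp)) hbm⟩
          · obtain ⟨m, hm, hxm⟩ := ih hpt x (by simpa using hx)
            exact ⟨m, by simpa using hm, hxm⟩

lemma sorted_getLast?_eq_foldl_max (a : Int) (l : List Int) :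
    (PySem.List.sorted (a :: l) (fun x => x) false).getLast? = some (l.foldl max a) := by
  set s := PySem.List.sorted (a :: l) (fun x => x) false with hs
  have hperm : s.Perm (a :: l) := PySem.List.sorted_perm _ _ _
  have hpw : s.Pairwise (· ≤ ·) := by
    have := PySem.List.sorted_pairwise (a :: l) (fun x => x)
    simpa [hs] using this
  have hmemfold : l.foldl max a ∈ s := hperm.mem_iff.mpr (foldl_max_mem a l)
  obtain ⟨m, hm, hlem⟩ := pairwise_getLast?_ge s hpw _ hmemfold
  have hmmem : m ∈ a :: l := hperm.mem_iff.mp (List.mem_of_getLast? hm)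
  have hmle : m ≤ l.foldl max a := le_foldl_max a l m hmmem
  rw [hm, le_antisymm hlem hmle]

-- ===== VERDICT =====
theorem getMaxCoords_spec : Claim_equal_getMaxCoords := by
  intro coordinates _ hpre
  unfold Spec_getMaxCoords getMaxCoords getMaxCoords_alt
  match coordinates with
  | [] => exact absurd rfl hpre
  | c :: t =>
      simp only [List.map_cons, PySem.List.pyGet?_neg_one,
        sorted_getLast?_eq_foldl_max, List.foldl_cons, pairFold_eq]
      simp
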